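-- pv_equiv track=rewrite | github.com/hsuan-sp/mdm-support-site | scripts/maintenance/fix_bullets_only.py | fix_bullets
-- ===== SOURCE A (Python) =====
-- def fix_bullets(content):
--     lines = content.split('\n')
--     new_lines = []
--     for line in lines:
--         stripped = line.lstrip()
--         # If line starts with *** but isn't just a HR
--         if stripped.startswith('***') and len(stripped.replace('*', '').strip()) > 0:
--             indent = line[:line.find('***')]
--             # Replace first instance of *** with * **
--             line = indent + '* **' + stripped[3:]
--         new_lines.append(line)
--     return '\n'.join(new_lines)
-- ===== SOURCE B (Python) =====
-- import re
--
-- _BULLET_RE = re.compile(r'(?m)^([ \t\f\v\r]*)\*\*\*(?=[*\t \f\v\r]*[^*\s])')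
--
-- def fix_bullets(content):
--     return _BULLET_RE.sub(r'\1* **', content)
-- ===== Notes on version B (the rewrite author's own statement) =====
-- stated objective: idiomatic
-- what changed: Replaced the split-into-lines / per-line test-and-rebuild / join loop by a single multiline-anchored regex substitution over the whole string (ported to Lean as the scanner the regex engine performs: match indent+'***'+lookahead at each line start, otherwise copy to the next newline).
import Mathlib
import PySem

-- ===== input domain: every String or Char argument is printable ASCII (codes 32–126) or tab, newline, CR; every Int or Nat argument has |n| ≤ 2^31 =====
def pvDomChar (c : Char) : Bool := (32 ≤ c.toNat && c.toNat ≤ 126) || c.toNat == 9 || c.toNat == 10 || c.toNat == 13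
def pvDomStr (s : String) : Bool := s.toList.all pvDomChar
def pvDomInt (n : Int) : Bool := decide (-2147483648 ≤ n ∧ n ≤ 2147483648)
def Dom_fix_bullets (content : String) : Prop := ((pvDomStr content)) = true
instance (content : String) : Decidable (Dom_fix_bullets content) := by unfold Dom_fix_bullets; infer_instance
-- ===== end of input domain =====

-- B replaces A's split / per-line loop / join with one multiline regex substitution (idiomatic);
-- the port of B transcribes the scan that regex performs: try the pattern at each line start, else copy up to the newline.

-- ===== PORT A =====
-- the loop body of A, on one line (as List Char)
def fixLineA (line : List Char) : List Char :=
  let stripped := PySem.Chars.lstrip line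
  if PySem.Chars.startswith stripped ['*', '*', '*'] &&
      decide (0 < PySem.Chars.len (PySem.Chars.strip (PySem.Chars.replace stripped ['*'] []))) then
    let indent := PySem.Chars.slice line none (some (PySem.Chars.find line ['*', '*', '*']))
    indent ++ ['*', ' ', '*', '*'] ++ PySem.Chars.slice stripped (some 3) none
  else line

def fix_bullets (content : String) : String :=
  let lines := PySem.Chars.splitOn content.toList ['\n']
  let newLines := lines.foldl (fun acc line => acc ++ [fixLineA line]) ([] : List (List Char))
  String.ofList (PySem.Chars.join ['\n'] newLines)

-- ===== PORT B =====
-- Source B's regex has no Lean counterpart; it is hand-ported, exactly the scan the engine performs.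
-- the indent class [ \t\f\v\r]
def bIndentWs (c : Char) : Bool := c == ' ' || c == '\t' || c == '\x0c' || c == '\x0b' || c == '\r'

-- the literal '***'
def bStarts3 (l : List Char) : Bool := l.take 3 == ['*', '*', '*']

-- the lookahead (?=[*\t \f\v\r]*[^*\s])
def bLookClass (c : Char) : Bool := c == '*' || bIndentWs c

def bLookahead (l : List Char) : Bool :=
  match l.dropWhile bLookClass with
  | [] => false
  | c :: _ => !(c == '\n')

mutual
-- attempt the anchored pattern at a line start
def bLineStart (cs : List Char) : List Char :=
  let ws := cs.takeWhile bIndentWs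
  let rest := cs.dropWhile bIndentWs
  if bStarts3 rest && bLookahead (rest.drop 3) then
    ws ++ ['*', ' ', '*', '*'] ++ bCopy (rest.drop 3)
  else
    ws ++ bCopy rest
termination_by 2 * cs.length + 1
decreasing_by
  · have h1 := List.length_dropWhile_le bIndentWs cs
    have h2 : (List.drop 3 (cs.dropWhile bIndentWs)).length = (cs.dropWhile bIndentWs).length - 3 :=
      List.length_drop
    omega
  · have := List.length_dropWhile_le bIndentWs cs
    omega
-- no further match possible before the next newline: copy
def bCopy : List Char → List Char
  | [] => []
  | c :: t => if c == '\n' then c :: bLineStart t else c :: bCopy t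
termination_by l => 2 * l.length
decreasing_by
  · simp; omega
  · simp
end

def fix_bullets_alt (content : String) : String :=
  String.ofList (bLineStart content.toList)

-- ===== PRECONDITION & SPEC =====
def Spec_fix_bullets (content : String) (out : String) : Prop := out = fix_bullets_alt content
instance (content : String) (out : String) : Decidable (Spec_fix_bullets content out) := by unfold Spec_fix_bullets; infer_instance

-- ===== CLAIM (what is proved, stated in full; the proofs are below) =====
def Claim_equal_fix_bullets : Prop := ∀ (content : String), Dom_fix_bullets content → Spec_fix_bullets content (fix_bullets content)

-- ===== LEMMAS AND PROOFS =====

-- simple splitter equal to PySem.Chars.splitOn · ['\n']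
def splitNl : List Char → List Char → List (List Char)
  | [], cur => [cur.reverse]
  | c :: t, cur => if c == '\n' then cur.reverse :: splitNl t [] else splitNl t (c :: cur)

theorem splitOn_go_eq (fuel : Nat) : ∀ (l cur : List Char) (acc : List (List Char)),
    l.length < fuel →
    PySem.Chars.splitOn.go ['\n'] fuel l cur acc = acc.reverse ++ splitNl l cur := by
  induction fuel with
  | zero => intro l cur acc h; omega
  | succ n ih =>
    intro l cur acc h
    cases l with
    | nil => simp [PySem.Chars.splitOn.go, splitNl]
    | cons c t =>
      by_cases hc : c = '\n'
      · subst hc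
        rw [show PySem.Chars.splitOn.go ['\n'] (n + 1) ('\n' :: t) cur acc
            = PySem.Chars.splitOn.go ['\n'] n (List.drop 1 ('\n' :: t)) [] (cur.reverse :: acc) by
          simp [PySem.Chars.splitOn.go, List.isPrefixOf]]
        rw [ih _ _ _ (by simp at h ⊢; omega)]
        simp [splitNl]
      · have hpre : List.isPrefixOf ['\n'] (c :: t) = false := by
          simp [List.isPrefixOf]; exact fun h' => absurd h'.symm hc
        rw [show PySem.Chars.splitOn.go ['\n'] (n + 1) (c :: t) cur acc
            = PySem.Chars.splitOn.go ['\n'] n t (c :: cur) acc by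
          simp [PySem.Chars.splitOn.go, hpre]]
        rw [ih _ _ _ (by simp at h ⊢; omega)]
        simp [splitNl, hc]

theorem splitOn_eq_splitNl (cs : List Char) :
    PySem.Chars.splitOn cs ['\n'] = splitNl cs [] := by
  unfold PySem.Chars.splitOn
  rw [splitOn_go_eq (cs.length + 1) cs [] [] (by omega)]
  simp

theorem splitNl_no_nl (l : List Char) (cur : List Char) (h : '\n' ∉ l) :
    splitNl l cur = [cur.reverse ++ l] := by
  induction l generalizing cur with
  | nil => simp [splitNl]
  | cons c t ih =>
    have hc : ¬ (c == '\n') = true := by simp; rintro rfl; exact h List.mem_cons_self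
    rw [splitNl, if_neg hc, ih _ (fun hm => h (List.mem_cons_of_mem _ hm))]
    simp

theorem splitNl_append (line rest : List Char) (cur : List Char) (h : '\n' ∉ line) :
    splitNl (line ++ '\n' :: rest) cur = (cur.reverse ++ line) :: splitNl rest [] := by
  induction line generalizing cur with
  | nil => simp [splitNl]
  | cons c t ih =>
    have hc : ¬ (c == '\n') = true := by simp; rintro rfl; exact h List.mem_cons_self
    rw [List.cons_append, splitNl, if_neg hc, ih _ (fun hm => h (List.mem_cons_of_mem _ hm))]
    simp

theorem splitNl_ne_nil (l cur : List Char) : splitNl l cur ≠ [] := by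
  induction l generalizing cur with
  | nil => simp [splitNl]
  | cons c t ih => rw [splitNl]; split <;> simp [ih]

-- replace with a one-character old and empty new is filter
theorem replace_go_star (fuel : Nat) : ∀ (l acc : List Char), l.length ≤ fuel →
    PySem.Chars.replace.go ['*'] [] fuel l acc = acc.reverse ++ l.filter (fun c => !(c == '*')) := by
  induction fuel with
  | zero =>
    intro l acc h
    have : l = [] := List.length_eq_zero_iff.mp (by omega)
    subst this
    simp [PySem.Chars.replace.go]
  | succ n ih =>
    intro l acc h
    cases l with
    | nil => simp [PySem.Chars.replace.go]
    | cons c t =>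
      by_cases hc : c = '*'
      · subst hc
        rw [show PySem.Chars.replace.go ['*'] [] (n + 1) ('*' :: t) acc
            = PySem.Chars.replace.go ['*'] [] n (List.drop 1 ('*' :: t)) acc by
          simp [PySem.Chars.replace.go, List.isPrefixOf]]
        rw [ih _ _ (by simp at h ⊢; omega)]
        simp
      · have hpre : List.isPrefixOf ['*'] (c :: t) = false := by
          simp [List.isPrefixOf]; exact fun h' => absurd h'.symm hc
        rw [show PySem.Chars.replace.go ['*'] [] (n + 1) (c :: t) acc
            = PySem.Chars.replace.go ['*'] [] n t (c :: acc) by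
          simp [PySem.Chars.replace.go, hpre]]
        rw [ih _ _ (by simp at h ⊢; omega)]
        simp [hc]

theorem replace_star (s : List Char) :
    PySem.Chars.replace s ['*'] [] = s.filter (fun c => !(c == '*')) := by
  unfold PySem.Chars.replace
  rw [if_neg (by simp), replace_go_star s.length s [] le_rfl]
  simp

theorem strip_eq_nil_iff (s : List Char) :
    PySem.Chars.strip s = [] ↔ ∀ c ∈ s, PySem.Chars.isspace c = true := by
  unfold PySem.Chars.strip PySem.Chars.rstrip PySem.Chars.lstrip
  constructor
  · intro h c hc
    rw [List.reverse_eq_nil_iff, List.dropWhile_eq_nil_iff] at h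
    have hc' : c ∈ List.takeWhile PySem.Chars.isspace s ++ List.dropWhile PySem.Chars.isspace s := by
      rw [List.takeWhile_append_dropWhile]; exact hc
    rcases List.mem_append.mp hc' with h1 | h1
    · exact List.mem_takeWhile_imp h1
    · exact h c (by simpa using h1)
  · intro h
    have : List.dropWhile PySem.Chars.isspace s = [] :=
      List.dropWhile_eq_nil_iff.mpr fun c hc => h c hc
    simp [this]

theorem char_beq_toNat (c d : Char) : (c == d) = decide (c.toNat = d.toNat) := by
  rw [Bool.eq_iff_iff]
  simp only [beq_iff_eq, decide_eq_true_eq]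
  constructor
  · rintro rfl; rfl
  · intro h
    exact Char.ext (UInt32.toNat_inj.mp h)

-- character-level: on domain characters other than newline, the regex indent class is Python isspace
theorem bIndentWs_eq_isspace (c : Char) (hd : pvDomChar c = true) (hn : c ≠ '\n') :
    bIndentWs c = PySem.Chars.isspace c := by
  have hv : c.toNat ≠ 10 := by
    intro h
    exact hn (Char.ext (UInt32.toNat_inj.mp (h.trans rfl)))
  simp only [pvDomChar, Bool.or_eq_true, Bool.and_eq_true, decide_eq_true_eq, beq_iff_eq] at hd
  rw [bIndentWs, PySem.Chars.isspace, Bool.eq_iff_iff]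
  rw [char_beq_toNat c ' ', char_beq_toNat c '\t', char_beq_toNat c '\x0c',
    char_beq_toNat c '\x0b', char_beq_toNat c '\r',
    show (' ').toNat = 32 from rfl, show ('\t').toNat = 9 from rfl,
    show ('\x0c').toNat = 12 from rfl, show ('\x0b').toNat = 11 from rfl,
    show ('\r').toNat = 13 from rfl]
  simp only [Bool.or_eq_true, Bool.and_eq_true, decide_eq_true_eq]
  omega

theorem bStarts3_eq_startswith (l : List Char) :
    bStarts3 l = PySem.Chars.startswith l ['*', '*', '*'] := by
  unfold bStarts3
  rw [Bool.eq_iff_iff, PySem.Chars.startswith_iff, List.prefix_iff_eq_take,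
    show (['*', '*', '*'] : List Char).length = 3 from rfl]
  simp only [beq_iff_eq]
  exact ⟨Eq.symm, Eq.symm⟩

-- the lookahead equals A's "not a horizontal rule" test, on a newline-free domain line
theorem takeWhile_congr' {p q : Char → Bool} (l : List Char) (h : ∀ x ∈ l, p x = q x) :
    l.takeWhile p = l.takeWhile q := by
  induction l with
  | nil => rfl
  | cons c t ih =>
    rw [List.takeWhile_cons, List.takeWhile_cons, h c List.mem_cons_self,
      ih (fun x hx => h x (List.mem_cons_of_mem _ hx))]

theorem dropWhile_congr' {p q : Char → Bool} (l : List Char) (h : ∀ x ∈ l, p x = q x) :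
    l.dropWhile p = l.dropWhile q := by
  induction l with
  | nil => rfl
  | cons c t ih =>
    rw [List.dropWhile_cons, List.dropWhile_cons, h c List.mem_cons_self,
      ih (fun x hx => h x (List.mem_cons_of_mem _ hx))]

theorem strip_pos_iff (s : List Char) :
    (0 < PySem.Chars.len (PySem.Chars.strip s)) ↔ ∃ c ∈ s, PySem.Chars.isspace c = false := by
  rw [PySem.Chars.len_eq, Int.natCast_pos, List.length_pos_iff]
  constructor
  · intro h
    by_contra hng
    exact h ((strip_eq_nil_iff s).mpr fun c hc => by
      rcases hb : PySem.Chars.isspace c with _ | _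
      · exact absurd ⟨c, hc, hb⟩ hng
      · rfl)
  · rintro ⟨c, hc, hcs⟩ h0
    rw [strip_eq_nil_iff] at h0
    rw [h0 c hc] at hcs
    cases hcs

theorem dropWhile_head_false {p : Char → Bool} {l : List Char} {c : Char} {r : List Char}
    (h : l.dropWhile p = c :: r) : p c = false := by
  induction l with
  | nil => cases h
  | cons a t ih =>
    rw [List.dropWhile_cons] at h
    rcases ha : p a with _ | _
    · rw [ha] at h
      simp only [Bool.false_eq_true, if_false] at h
      injection h with h1 _
      rw [← h1]; exact ha
    · rw [ha] at h
      simp only [if_true] at h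
      exact ih h

theorem bLookahead_eq_cond (t : List Char) (hd : ∀ c ∈ t, pvDomChar c = true) (hn : '\n' ∉ t) :
    bLookahead t =
      decide (0 < PySem.Chars.len (PySem.Chars.strip (t.filter (fun c => !(c == '*'))))) := by
  have hcong : ∀ x ∈ t, bLookClass x = (x == '*' || PySem.Chars.isspace x) := by
    intro x hx
    rw [bLookClass, bIndentWs_eq_isspace x (hd x hx) (fun he => hn (he ▸ hx))]
  rw [Bool.eq_iff_iff, decide_eq_true_eq, strip_pos_iff]
  unfold bLookahead
  rw [dropWhile_congr' t hcong]
  rcases hdw : t.dropWhile (fun x => x == '*' || PySem.Chars.isspace x) with _ | ⟨c, r⟩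
  · simp only [Bool.false_eq_true, false_iff]
    rw [List.dropWhile_eq_nil_iff] at hdw
    rintro ⟨c, hcf, hcs⟩
    rw [List.mem_filter] at hcf
    have := hdw c hcf.1
    simp only [Bool.or_eq_true, beq_iff_eq] at this
    rcases this with h1 | h1
    · simp [h1] at hcf
    · rw [h1] at hcs; cases hcs
  · have hcmem : c ∈ t := (List.dropWhile_sublist _).subset (hdw ▸ List.mem_cons_self)
    have hcp := dropWhile_head_false hdw
    simp only [Bool.or_eq_false_iff] at hcp
    have hcn : (c == '\n') = false := by
      simp only [beq_eq_false_iff_ne, ne_eq]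
      rintro rfl; exact hn hcmem
    simp only [hcn, Bool.not_false, true_iff]
    exact ⟨c, List.mem_filter.mpr ⟨hcmem, by simp [hcp.1]⟩, hcp.2⟩

-- find '***' points at the end of the leading whitespace once lstrip starts with '***'
theorem drop_takeWhile_length {p : Char → Bool} (l : List Char) :
    l.drop (l.takeWhile p).length = l.dropWhile p := by
  induction l with
  | nil => rfl
  | cons c t ih =>
    rw [List.takeWhile_cons, List.dropWhile_cons]
    rcases hc : p c with _ | _
    · simp
    · simpa using ih

theorem find_stars (ln : List Char)
    (hp : ['*', '*', '*'] <+: List.dropWhile PySem.Chars.isspace ln) :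
    PySem.Chars.find ln ['*', '*', '*'] = ((ln.takeWhile PySem.Chars.isspace).length : Int) := by
  have hln : ln = ln.takeWhile PySem.Chars.isspace ++ ln.dropWhile PySem.Chars.isspace :=
    (List.takeWhile_append_dropWhile).symm
  have hinf : ['*', '*', '*'] <:+: ln := hp.isInfix.trans (List.dropWhile_suffix _).isInfix
  have h0 : 0 ≤ PySem.Chars.find ln ['*', '*', '*'] :=
    (PySem.Chars.find_nonneg_iff _ _).mpr hinf
  obtain ⟨hpref, hmin⟩ := PySem.Chars.find_spec h0
  set i := (PySem.Chars.find ln ['*', '*', '*']).toNat with hi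
  have hdropw : ln.drop (ln.takeWhile PySem.Chars.isspace).length
      = ln.dropWhile PySem.Chars.isspace := drop_takeWhile_length ln
  have hle : i ≤ (ln.takeWhile PySem.Chars.isspace).length := by
    by_contra hgt
    exact hmin _ (Nat.lt_of_not_le hgt) (hdropw ▸ hp)
  have hnotlt : ¬ i < (ln.takeWhile PySem.Chars.isspace).length := by
    intro hlt
    obtain ⟨u, hu⟩ := hpref
    have hget : ln[i]? = some '*' := by
      have h1 : (ln.drop i)[0]? = some '*' := by
        rw [← hu]; rfl
      rw [List.getElem?_drop] at h1
      simpa using h1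
    have hget2 : ln[i]? = (ln.takeWhile PySem.Chars.isspace)[i]? := by
      conv_lhs => rw [hln]
      rw [List.getElem?_append, if_pos hlt]
    rw [hget2] at hget
    have hmemw : '*' ∈ ln.takeWhile PySem.Chars.isspace := List.mem_of_getElem? hget
    exact absurd (List.mem_takeWhile_imp hmemw) (by decide)
  omega

theorem bCopy_no_nl (l : List Char) (h : '\n' ∉ l) : bCopy l = l := by
  induction l with
  | nil => rw [bCopy]
  | cons c t ih =>
    have hc : ¬ (c == '\n') = true := by simp; rintro rfl; exact h List.mem_cons_self
    rw [bCopy, if_neg hc, ih (fun hm => h (List.mem_cons_of_mem _ hm))]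

theorem bCopy_append (l rest : List Char) (h : '\n' ∉ l) :
    bCopy (l ++ '\n' :: rest) = l ++ '\n' :: bLineStart rest := by
  induction l with
  | nil => rw [List.nil_append, bCopy, if_pos (by simp), List.nil_append]
  | cons c t ih =>
    have hc : ¬ (c == '\n') = true := by simp; rintro rfl; exact h List.mem_cons_self
    rw [List.cons_append, bCopy, if_neg hc, ih (fun hm => h (List.mem_cons_of_mem _ hm))]
    simp

-- A's per-line rewrite, expressed in the vocabulary of B's scanner
theorem fixLineA_parts (line : List Char) (hd : ∀ c ∈ line, pvDomChar c = true)
    (hn : '\n' ∉ line) :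
    fixLineA line =
      line.takeWhile bIndentWs ++
        (if bStarts3 (line.dropWhile bIndentWs) && bLookahead ((line.dropWhile bIndentWs).drop 3)
         then ['*', ' ', '*', '*'] ++ (line.dropWhile bIndentWs).drop 3
         else line.dropWhile bIndentWs) := by
  have hc1 : line.takeWhile bIndentWs = line.takeWhile PySem.Chars.isspace :=
    takeWhile_congr' _ (fun x hx => bIndentWs_eq_isspace x (hd x hx) (fun he => hn (he ▸ hx)))
  have hc2 : line.dropWhile bIndentWs = PySem.Chars.lstrip line :=
    dropWhile_congr' _ (fun x hx => bIndentWs_eq_isspace x (hd x hx) (fun he => hn (he ▸ hx)))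
  unfold fixLineA
  simp only [hc1, hc2, bStarts3_eq_startswith]
  rcases hS : PySem.Chars.startswith (PySem.Chars.lstrip line) ['*', '*', '*'] with _ | _
  · simp [PySem.Chars.lstrip, List.takeWhile_append_dropWhile]
  · obtain ⟨u, hu⟩ := (PySem.Chars.startswith_iff _ _).mp hS
    rw [← hu] at hS ⊢
    have hdrop3 : (['*', '*', '*'] ++ u).drop 3 = u := rfl
    have hrep : PySem.Chars.replace (['*', '*', '*'] ++ u) ['*'] []
        = u.filter (fun c => !(c == '*')) := by
      rw [replace_star]; simp
    have hmemu : ∀ c ∈ u, c ∈ line := by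
      intro c hcm
      exact (List.dropWhile_sublist PySem.Chars.isspace).subset
        (by rw [← PySem.Chars.lstrip, ← hu]; exact List.mem_append_right _ hcm)
    have hcond : bLookahead u
        = decide (0 < PySem.Chars.len (PySem.Chars.strip (u.filter (fun c => !(c == '*'))))) :=
      bLookahead_eq_cond u (fun c hcm => hd c (hmemu c hcm)) (fun hm => hn (hmemu _ hm))
    simp only [hdrop3, hrep, hcond, Bool.true_and]
    rcases hC : decide (0 < PySem.Chars.len (PySem.Chars.strip
        (u.filter (fun c => !(c == '*'))))) with _ | _
    · simp only [Bool.false_eq_true, if_false]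
      rw [hu]
      simp [PySem.Chars.lstrip, List.takeWhile_append_dropWhile]
    · simp only [if_true]
      have hp : ['*', '*', '*'] <+: List.dropWhile PySem.Chars.isspace line :=
        ⟨u, by simpa [PySem.Chars.lstrip] using hu⟩
      rw [find_stars line hp]
      simp only [PySem.Chars.slice_eq_listSlice]
      rw [PySem.List.slice_to line (by positivity), PySem.List.slice_from _ (by norm_num)]
      simp only [Int.toNat_natCast]
      rw [(List.prefix_iff_eq_take.mp (List.takeWhile_prefix _)).symm,
        show (3 : Int).toNat = 3 from rfl, hdrop3]
      simp [List.append_assoc]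

theorem bLineStart_no_nl (line : List Char) (hd : ∀ c ∈ line, pvDomChar c = true)
    (hn : '\n' ∉ line) : bLineStart line = fixLineA line := by
  rw [bLineStart, fixLineA_parts line hd hn]
  have hmemd : ∀ c ∈ (line.dropWhile bIndentWs).drop 3, c ∈ line := fun c hc =>
    (List.dropWhile_sublist bIndentWs).subset ((List.drop_sublist 3 _).subset hc)
  have hmemd' : ∀ c ∈ line.dropWhile bIndentWs, c ∈ line := fun c hc =>
    (List.dropWhile_sublist bIndentWs).subset hc
  rcases hb : bStarts3 (line.dropWhile bIndentWs)
      && bLookahead ((line.dropWhile bIndentWs).drop 3) with _ | _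
  · simp only [Bool.false_eq_true, if_false]
    rw [bCopy_no_nl _ (fun hm => hn (hmemd' _ hm))]
  · simp only [if_true]
    rw [bCopy_no_nl _ (fun hm => hn (hmemd _ hm))]
    simp [List.append_assoc]

theorem takeWhile_append_false {p : Char → Bool} (l r : List Char) (a : Char) (ha : p a = false) :
    (l ++ a :: r).takeWhile p = l.takeWhile p := by
  induction l with
  | nil => simp [ha]
  | cons c t ih => rw [List.cons_append, List.takeWhile_cons, List.takeWhile_cons, ih]

theorem dropWhile_append_false {p : Char → Bool} (l r : List Char) (a : Char) (ha : p a = false) :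
    (l ++ a :: r).dropWhile p = l.dropWhile p ++ a :: r := by
  induction l with
  | nil => simp [ha]
  | cons c t ih =>
    rw [List.cons_append, List.dropWhile_cons, List.dropWhile_cons]
    rcases hc : p c with _ | _
    · simp
    · simpa using ih

theorem bStarts3_append_nl (l r : List Char) : bStarts3 (l ++ '\n' :: r) = bStarts3 l := by
  rcases l with _ | ⟨a, _ | ⟨b, _ | ⟨c, t⟩⟩⟩
  · simp [bStarts3, List.take]
  · simp [bStarts3, List.take]
  · simp [bStarts3, List.take]
  · simp [bStarts3, List.take]

theorem bLookahead_cons (c : Char) (x : List Char) :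
    bLookahead (c :: x) = if bLookClass c then bLookahead x else !(c == '\n') := by
  unfold bLookahead
  rw [List.dropWhile_cons]
  rcases h : bLookClass c with _ | _ <;> simp

theorem bLookahead_append_nl (t r : List Char) : bLookahead (t ++ '\n' :: r) = bLookahead t := by
  induction t with
  | nil =>
    rw [List.nil_append, bLookahead_cons, if_neg (by decide)]
    rfl
  | cons c x ih => rw [List.cons_append, bLookahead_cons, bLookahead_cons, ih]

theorem bLineStart_append (line rest : List Char) (hd : ∀ c ∈ line, pvDomChar c = true)
    (hn : '\n' ∉ line) :
    bLineStart (line ++ '\n' :: rest) = fixLineA line ++ '\n' :: bLineStart rest := by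
  have hnd : '\n' ∉ line.dropWhile bIndentWs := fun hm =>
    hn ((List.dropWhile_sublist bIndentWs).subset hm)
  rw [bLineStart, fixLineA_parts line hd hn,
    takeWhile_append_false line rest '\n' (by decide),
    dropWhile_append_false line rest '\n' (by decide)]
  rcases h3 : bStarts3 (line.dropWhile bIndentWs) with _ | _
  · rw [bStarts3_append_nl, h3]
    simp only [Bool.false_and, Bool.false_eq_true, if_false]
    rw [bCopy_append _ _ hnd, ← List.append_assoc, List.takeWhile_append_dropWhile]
  · have htake : (line.dropWhile bIndentWs).take 3 = ['*', '*', '*'] := by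
      have := h3
      unfold bStarts3 at this
      exact eq_of_beq this
    have hd3 : line.dropWhile bIndentWs
        = ['*', '*', '*'] ++ (line.dropWhile bIndentWs).drop 3 := by
      conv_lhs => rw [← List.take_append_drop 3 (line.dropWhile bIndentWs)]
      rw [htake]
    have hdropapp : (line.dropWhile bIndentWs ++ '\n' :: rest).drop 3
        = (line.dropWhile bIndentWs).drop 3 ++ '\n' :: rest := by
      conv_lhs => rw [hd3]
      rfl
    rw [bStarts3_append_nl, h3, hdropapp, bLookahead_append_nl]
    have hnd3 : '\n' ∉ (line.dropWhile bIndentWs).drop 3 := fun hm =>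
      hnd ((List.drop_sublist 3 _).subset hm)
    rcases hL : bLookahead ((line.dropWhile bIndentWs).drop 3) with _ | _
    · simp only [Bool.and_false, Bool.false_eq_true, if_false]
      rw [bCopy_append _ _ hnd, ← List.append_assoc, List.takeWhile_append_dropWhile]
    · simp only [Bool.and_true, if_true]
      rw [bCopy_append _ _ hnd3]
      simp [List.append_assoc]

theorem main_list (n : Nat) : ∀ cs : List Char, cs.length = n →
    (∀ c ∈ cs, pvDomChar c = true) →
    PySem.Chars.join ['\n'] ((splitNl cs []).map fixLineA) = bLineStart cs := by
  induction n using Nat.strong_induction_on with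
  | _ n ih =>
    intro cs hlen hd
    by_cases hmem : '\n' ∈ cs
    · have hne : cs.dropWhile (fun c => !(c == '\n')) ≠ [] := by
        intro h0
        rw [List.dropWhile_eq_nil_iff] at h0
        have := h0 _ hmem
        simp at this
      rcases hdw : cs.dropWhile (fun c => !(c == '\n')) with _ | ⟨c, rest⟩
      · exact absurd hdw hne
      have hc : c = '\n' := by
        have := dropWhile_head_false hdw
        simpa using this
      subst hc
      have hsplit : cs = cs.takeWhile (fun c => !(c == '\n')) ++ '\n' :: rest := by
        conv_lhs => rw [← List.takeWhile_append_dropWhile (p := fun c => !(c == '\n')) (l := cs)]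
        rw [hdw]
      have hnl : '\n' ∉ cs.takeWhile (fun c => !(c == '\n')) := fun hm => by
        have := List.mem_takeWhile_imp hm
        simp at this
      have hdline : ∀ c ∈ cs.takeWhile (fun c => !(c == '\n')), pvDomChar c = true :=
        fun c hcm => hd c (hsplit ▸ List.mem_append.mpr (Or.inl hcm))
      have hdrest : ∀ c ∈ rest, pvDomChar c = true :=
        fun c hcm => hd c (hsplit ▸ List.mem_append.mpr (Or.inr (List.mem_cons_of_mem _ hcm)))
      have hlt : rest.length < n := by
        have := congrArg List.length hsplit
        simp only [List.length_append, List.length_cons] at this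
        omega
      conv_lhs => rw [hsplit]
      rw [splitNl_append _ _ _ hnl, List.reverse_nil, List.nil_append, List.map_cons]
      rcases hsr : (splitNl rest []).map fixLineA with _ | ⟨b, l'⟩
      · exact absurd (List.map_eq_nil_iff.mp hsr) (splitNl_ne_nil rest [])
      rw [PySem.Chars.join_cons_cons, ← hsr, ih rest.length hlt rest rfl hdrest]
      conv_rhs => rw [hsplit]
      rw [bLineStart_append _ rest hdline hnl]
      simp [List.append_assoc]
    · rw [splitNl_no_nl cs [] hmem, List.reverse_nil, List.nil_append, List.map_cons,
        List.map_nil, PySem.Chars.join_singleton, bLineStart_no_nl cs hd hmem]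

-- ===== VERDICT (by name: the statement is the Claim_ definition above) =====
theorem fix_bullets_spec : Claim_equal_fix_bullets := by
  intro content hdom
  have hd : ∀ c ∈ content.toList, pvDomChar c = true := by
    have := hdom
    unfold Dom_fix_bullets pvDomStr at this
    simpa [List.all_eq_true] using this
  unfold Spec_fix_bullets fix_bullets fix_bullets_alt
  simp only []
  rw [PySem.List.foldl_append_singleton_eq_map fixLineA _ []]
  rw [splitOn_eq_splitNl, List.nil_append, main_list content.toList.length content.toList rfl hd]
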